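-- pv_equiv track=rewrite | github.com/TVJunkie724/master-thesis | 3-cloud-deployer/src/api/azure_credentials_checker.py | _action_matches
-- ===== SOURCE A (Python) =====
-- def _action_matches(user_actions: set, required_action: str) -> bool:
--     """
--     Check if user's actions cover the required action.
--
--     Handles wildcards like:
--     - "*/read" matches any read action
--     - "Microsoft.Web/*" matches all Web actions
--     """
--     if required_action in user_actions:
--         return True
--
--     # Check wildcard patterns
--     for action in user_actions:
--         if action == "*":
--             return True
--         if action.endswith("/*"):
--             prefix = action[:-1]  # Remove "*"
--             if required_action.startswith(prefix):
--                 return True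
--         if action == "*/read" and required_action.endswith("/read"):
--             return True
--         if action == "*/write" and required_action.endswith("/write"):
--             return True
--         if action == "*/delete" and required_action.endswith("/delete"):
--             return True
--         if action == "*/action" and required_action.endswith("/action"):
--             return True
--
--     return False
-- ===== SOURCE B (Python) =====
-- def _action_matches(user_actions: set, required_action: str) -> bool:
--     """Generate every pattern string that would grant required_action,
--     then test membership of each candidate in user_actions."""
--     candidates = {required_action, "*"}
--     for suffix in ("/read", "/write", "/delete", "/action"):
--         if required_action.endswith(suffix):
--             candidates.add("*" + suffix)
--     for i, ch in enumerate(required_action):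
--         if ch == "/":
--             candidates.add(required_action[:i + 1] + "*")
--     return any(c in user_actions for c in candidates)
-- ===== Notes on version B (the rewrite author's own statement) =====
-- stated objective: alternative
-- what changed: Inverts the matching direction: instead of scanning user_actions and testing every wildcard rule against each action, B precomputes from required_action alone the finite set of pattern strings that could grant it (itself, '*', the matching '*/suffix' tokens, and one 'prefix/*' candidate per '/' in required_action) and returns whether any candidate is a member of user_actions.
import Mathlib
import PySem

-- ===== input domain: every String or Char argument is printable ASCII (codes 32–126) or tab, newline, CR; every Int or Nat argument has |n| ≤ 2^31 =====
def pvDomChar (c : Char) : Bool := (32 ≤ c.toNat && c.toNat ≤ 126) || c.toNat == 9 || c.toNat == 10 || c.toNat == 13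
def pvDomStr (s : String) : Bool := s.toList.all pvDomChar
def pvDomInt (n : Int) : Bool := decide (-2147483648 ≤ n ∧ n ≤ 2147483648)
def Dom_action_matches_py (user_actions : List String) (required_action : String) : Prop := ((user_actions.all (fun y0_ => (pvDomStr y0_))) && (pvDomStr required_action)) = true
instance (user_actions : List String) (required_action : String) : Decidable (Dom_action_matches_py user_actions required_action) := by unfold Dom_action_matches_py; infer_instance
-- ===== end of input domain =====

-- B inverts the problem: instead of scanning user_actions and testing every wildcard rule
-- against each action, it generates from required_action alone the finite set of pattern
-- strings that would grant it (itself, "*", the matching "*/suffix" tokens, and one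
-- "prefix/*" per '/' in required_action) and tests each for membership; same return value.

-- ===== PORT A =====
-- the 'for action in user_actions' loop with its early returns
def pvALoop (required_action : String) : List String → Bool
  | [] => false
  | a :: rest =>
    if a == "*" then true
    else if PySem.Str.endswith a "/*" &&
            PySem.Str.startswith required_action (PySem.Str.slice a none (some (-1))) then true
    else if a == "*/read" && PySem.Str.endswith required_action "/read" then true
    else if a == "*/write" && PySem.Str.endswith required_action "/write" then true
    else if a == "*/delete" && PySem.Str.endswith required_action "/delete" then true
    else if a == "*/action" && PySem.Str.endswith required_action "/action" then true
    else pvALoop required_action rest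

def action_matches_py (user_actions : List String) (required_action : String) : Bool :=
  if user_actions.contains required_action then true
  else pvALoop required_action user_actions

-- ===== PORT B =====
-- builds Source B's 'candidates' set: {required_action, "*"} plus the "*/suffix" tokens whose
-- suffix ends required_action, plus required_action[:i+1] + "*" for each '/' at index i
def pvCandidatesB (required_action : String) : PySem.Set String :=
  let c0 : PySem.Set String := PySem.Set.ofList [required_action, "*"]
  let c1 := (["/read", "/write", "/delete", "/action"] : List String).foldl
    (fun c s => if PySem.Str.endswith required_action s then PySem.Set.add c ("*" ++ s) else c) c0
  (PySem.List.enumerate required_action.toList 0).foldl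
    (fun c p => if p.2 == '/' then
        PySem.Set.add c (PySem.Str.slice required_action none (some (p.1 + 1)) ++ "*")
      else c) c1

def action_matches_py_alt (user_actions : List String) (required_action : String) : Bool :=
  (pvCandidatesB required_action).any (fun c => user_actions.contains c)

-- ===== PRECONDITION & SPEC =====
def Spec_action_matches_py (user_actions : List String) (required_action : String) (out : Bool) : Prop := out = action_matches_py_alt user_actions required_action
instance (user_actions : List String) (required_action : String) (out : Bool) : Decidable (Spec_action_matches_py user_actions required_action out) := by unfold Spec_action_matches_py; infer_instance

-- ===== CLAIM (what is proved, stated in full; the proofs are below) =====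
def Claim_equal_action_matches_py : Prop := ∀ (user_actions : List String) (required_action : String), Dom_action_matches_py user_actions required_action → Spec_action_matches_py user_actions required_action (action_matches_py user_actions required_action)

-- ===== LEMMAS AND PROOFS =====
theorem pv_ite_or (b x : Bool) : (if b then true else x) = (b || x) := by
  cases b <;> simp

-- A's loop returns the disjunction of the five membership facts and the "/*"-prefix scan
theorem pvALoop_eq (req : String) (ua : List String) :
    pvALoop req ua =
      (ua.contains "*" ||
       (PySem.Str.endswith req "/read" && ua.contains "*/read") ||
       (PySem.Str.endswith req "/write" && ua.contains "*/write") ||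
       (PySem.Str.endswith req "/delete" && ua.contains "*/delete") ||
       (PySem.Str.endswith req "/action" && ua.contains "*/action") ||
       ua.any (fun a => PySem.Str.endswith a "/*" &&
                PySem.Str.startswith req (PySem.Str.slice a none (some (-1))))) := by
  induction ua with
  | nil => simp [pvALoop]
  | cons a rest ih =>
    simp only [pvALoop, pv_ite_or, ih, List.contains_cons, List.any_cons, BEq.comm]
    clear ih
    generalize (a == "*") = m
    generalize (PySem.Str.endswith a "/*" && PySem.Str.startswith req (PySem.Str.slice a none (some (-1)))) = qa
    generalize (a == "*/read") = r
    generalize (a == "*/write") = w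
    generalize (a == "*/delete") = d
    generalize (a == "*/action") = c
    generalize PySem.Str.endswith req "/read" = er
    generalize PySem.Str.endswith req "/write" = ew
    generalize PySem.Str.endswith req "/delete" = ed
    generalize PySem.Str.endswith req "/action" = ec
    generalize rest.contains "*" = ms
    generalize rest.contains "*/read" = mr
    generalize rest.contains "*/write" = mw
    generalize rest.contains "*/delete" = md
    generalize rest.contains "*/action" = mc
    generalize (rest.any fun a => PySem.Str.endswith a "/*" && PySem.Str.startswith req (PySem.Str.slice a none (some (-1)))) = aq
    revert m qa r w d c er ew ed ec ms mr mw md mc aq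
    decide

-- membership through a fold of conditional Set.add's
theorem pv_mem_foldl_add_if {β : Type} (l : List β) (c0 : List String)
    (P : β → Bool) (f : β → String) (y : String) :
    (y ∈ l.foldl (fun c p => if P p then PySem.Set.add c (f p) else c) c0) ↔
      y ∈ c0 ∨ ∃ p ∈ l, P p = true ∧ y = f p := by
  induction l generalizing c0 with
  | nil => simp
  | cons p rest ih =>
    simp only [List.foldl_cons, ih]
    by_cases h : P p = true
    · simp [h, PySem.Set.mem_add]
      try tauto
    · simp [h]
      try tauto

-- what Source B's candidate set contains
theorem pv_mem_candidates (req : String) (y : String) :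
    y ∈ pvCandidatesB req ↔
      y = req ∨ y = "*" ∨
      (∃ s ∈ (["/read", "/write", "/delete", "/action"] : List String),
          PySem.Str.endswith req s = true ∧ y = "*" ++ s) ∨
      (∃ p ∈ PySem.List.enumerate req.toList 0, p.2 = '/' ∧
          y = PySem.Str.slice req none (some (p.1 + 1)) ++ "*") := by
  unfold pvCandidatesB
  rw [pv_mem_foldl_add_if, pv_mem_foldl_add_if]
  simp [PySem.Set.mem_ofList, beq_iff_eq]
  tauto

-- the crux: A's "/*"-prefix scan over user_actions finds a hit iff one of B's
-- per-'/' prefix candidates is a member of user_actions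
theorem pv_prefix_scan_iff (ua : List String) (req : String) :
    (∃ a ∈ ua, PySem.Str.endswith a "/*" = true ∧
        PySem.Str.startswith req (PySem.Str.slice a none (some (-1))) = true) ↔
      (∃ p ∈ PySem.List.enumerate req.toList 0, p.2 = '/' ∧
        (PySem.Str.slice req none (some (p.1 + 1)) ++ "*") ∈ ua) := by
  constructor
  · rintro ⟨a, ha, hend, hstart⟩
    rw [PySem.Str.endswith_eq, PySem.Chars.endswith_iff] at hend
    obtain ⟨P, hP⟩ := hend
    rw [PySem.Str.startswith_eq, PySem.Chars.startswith_iff] at hstart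
    have hdl : (PySem.Str.slice a none (some (-1))).toList = a.toList.dropLast :=
      PySem.Str.slice_to_neg_one a
    rw [hdl] at hstart
    have hdrop : a.toList.dropLast = P ++ ['/'] := by
      rw [← hP]; simp
    rw [hdrop] at hstart
    -- hstart : P ++ ['/'] <+: req.toList
    have hlen : P.length + 1 ≤ req.toList.length := by
      have := hstart.length_le; simpa using this
    have hk : req.toList[P.length]'(by omega) = '/' := by
      have := (List.IsPrefix.getElem hstart (i := P.length)
        (by simp)).symm
      simpa using this
    refine ⟨((P.length : Int), '/'), ?_, rfl, ?_⟩
    · rw [PySem.List.mem_enumerate_iff]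
      exact ⟨P.length, by omega, by simp [hk]⟩
    · have htake : req.toList.take (P.length + 1) = P ++ ['/'] := by
        have := List.prefix_iff_eq_take.mp hstart
        simpa using this.symm
      have hstr : PySem.Str.slice req none (some ((P.length : Int) + 1)) ++ "*" = a := by
        apply String.toList_inj.mp
        rw [String.toList_append]
        have : (PySem.Str.slice req none (some ((P.length : Int) + 1))).toList
            = req.toList.take (P.length + 1) := by
          rw [PySem.Str.toList_slice]
          have : ((P.length : Int) + 1) = ((P.length + 1 : Nat) : Int) := by push_cast; ring
          rw [this, PySem.Chars.slice_eq_listSlice, PySem.List.slice_to_natCast]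
        rw [this, htake, ← hP]
        have h2 : ("/*" : String).toList = ['/', '*'] := rfl
        have h1 : ("*" : String).toList = ['*'] := rfl
        rw [h1, h2]
        simp
      rw [hstr]; exact ha
  · rintro ⟨p, hp, hch, hmem⟩
    rw [PySem.List.mem_enumerate_iff] at hp
    obtain ⟨k, hk, hpk⟩ := hp
    subst hpk
    simp only at hch
    refine ⟨_, hmem, ?_, ?_⟩
    · rw [PySem.Str.endswith_eq, PySem.Chars.endswith_iff]
      rw [String.toList_append]
      have : (PySem.Str.slice req none (some (0 + (k : Int) + 1))).toList
          = req.toList.take (k + 1) := by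
        rw [PySem.Str.toList_slice]
        have : ((0 : Int) + (k : Int) + 1) = ((k + 1 : Nat) : Int) := by push_cast; ring
        rw [this, PySem.Chars.slice_eq_listSlice, PySem.List.slice_to_natCast]
      rw [this]
      have htk : req.toList.take (k + 1) = req.toList.take k ++ ['/'] := by
        simp [List.take_succ, List.getElem?_eq_getElem hk, hch]
      rw [htk]
      exact ⟨req.toList.take k, by simp⟩
    · rw [PySem.Str.startswith_eq, PySem.Chars.startswith_iff]
      have hdl : (PySem.Str.slice (PySem.Str.slice req none (some (0 + (k : Int) + 1)) ++ "*")
          none (some (-1))).toList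
          = (PySem.Str.slice req none (some (0 + (k : Int) + 1)) ++ "*").toList.dropLast :=
        PySem.Str.slice_to_neg_one _
      rw [hdl, String.toList_append]
      have : (PySem.Str.slice req none (some (0 + (k : Int) + 1))).toList
          = req.toList.take (k + 1) := by
        rw [PySem.Str.toList_slice]
        have : ((0 : Int) + (k : Int) + 1) = ((k + 1 : Nat) : Int) := by push_cast; ring
        rw [this, PySem.Chars.slice_eq_listSlice, PySem.List.slice_to_natCast]
      rw [this]
      have hstar : ("*" : String).toList = ['*'] := rfl
      rw [hstar]
      simp
      exact List.take_prefix _ _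

-- the common characterisation both programs are proved equal to
def pvMatchProp (ua : List String) (req : String) : Prop :=
  req ∈ ua ∨ "*" ∈ ua ∨
  (PySem.Str.endswith req "/read" = true ∧ "*/read" ∈ ua) ∨
  (PySem.Str.endswith req "/write" = true ∧ "*/write" ∈ ua) ∨
  (PySem.Str.endswith req "/delete" = true ∧ "*/delete" ∈ ua) ∨
  (PySem.Str.endswith req "/action" = true ∧ "*/action" ∈ ua) ∨
  (∃ a ∈ ua, PySem.Str.endswith a "/*" = true ∧
      PySem.Str.startswith req (PySem.Str.slice a none (some (-1))) = true)

theorem pvA_iff (ua : List String) (req : String) :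
    action_matches_py ua req = true ↔ pvMatchProp ua req := by
  unfold action_matches_py pvMatchProp
  rw [pv_ite_or, pvALoop_eq]
  simp only [Bool.or_eq_true, Bool.and_eq_true, List.any_eq_true, List.contains_iff_mem,
    or_assoc]

theorem pvB_iff (ua : List String) (req : String) :
    action_matches_py_alt ua req = true ↔ pvMatchProp ua req := by
  unfold action_matches_py_alt pvMatchProp
  simp only [List.any_eq_true, List.contains_iff_mem]
  constructor
  · rintro ⟨c, hc, hm⟩
    rcases (pv_mem_candidates req c).mp hc with rfl | rfl | ⟨s, hs, hend, rfl⟩ | ⟨p, hp, hch, rfl⟩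
    · exact Or.inl hm
    · exact Or.inr (Or.inl hm)
    · fin_cases hs
      · exact Or.inr (Or.inr (Or.inl ⟨hend, hm⟩))
      · exact Or.inr (Or.inr (Or.inr (Or.inl ⟨hend, hm⟩)))
      · exact Or.inr (Or.inr (Or.inr (Or.inr (Or.inl ⟨hend, hm⟩))))
      · exact Or.inr (Or.inr (Or.inr (Or.inr (Or.inr (Or.inl ⟨hend, hm⟩)))))
    · exact Or.inr (Or.inr (Or.inr (Or.inr (Or.inr (Or.inr
        ((pv_prefix_scan_iff ua req).mpr ⟨p, hp, hch, hm⟩))))))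
  · rintro (h | h | h | h | h | h | h)
    · exact ⟨req, (pv_mem_candidates req req).mpr (Or.inl rfl), h⟩
    · exact ⟨"*", (pv_mem_candidates req "*").mpr (Or.inr (Or.inl rfl)), h⟩
    · exact ⟨"*/read", (pv_mem_candidates req _).mpr
        (Or.inr (Or.inr (Or.inl ⟨"/read", by simp, h.1, rfl⟩))), h.2⟩
    · exact ⟨"*/write", (pv_mem_candidates req _).mpr
        (Or.inr (Or.inr (Or.inl ⟨"/write", by simp, h.1, rfl⟩))), h.2⟩
    · exact ⟨"*/delete", (pv_mem_candidates req _).mpr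
        (Or.inr (Or.inr (Or.inl ⟨"/delete", by simp, h.1, rfl⟩))), h.2⟩
    · exact ⟨"*/action", (pv_mem_candidates req _).mpr
        (Or.inr (Or.inr (Or.inl ⟨"/action", by simp, h.1, rfl⟩))), h.2⟩
    · obtain ⟨p, hp, hch, hm⟩ := (pv_prefix_scan_iff ua req).mp h
      exact ⟨_, (pv_mem_candidates req _).mpr
        (Or.inr (Or.inr (Or.inr ⟨p, hp, hch, rfl⟩))), hm⟩

-- ===== VERDICT (by name: the statement is the Claim_ definition above) =====
theorem action_matches_py_spec : Claim_equal_action_matches_py := by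
  intro ua req _
  unfold Spec_action_matches_py
  exact Bool.eq_iff_iff.mpr ((pvA_iff ua req).trans (pvB_iff ua req).symm)
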